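-- pv_equiv track=rewrite | github.com/Jirka-Mayer/Mashcima | mashcima/vocabulary.py | get_measures
-- ===== SOURCE A (Python) =====
-- from typing import List, Optional, Tuple
--
-- _BARLINES = [
--     "|", ":|", "|:"
-- ]
--
-- def is_barline(annotation_token: str) -> bool:
--     """Returns true if the token is some kind of barline"""
--     return annotation_token in _BARLINES
--
-- def get_measures(annotation: str) -> List[str]:
--     """
--     Splits annotation into annotations of individual measures.
--
--     WARNING: This split is done in a dummy way and ignores barline attachments
--     and similar, so should be used with caution.
--     """
--     tokens = annotation.split()
--
--     if tokens[0] == "|":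
--         tokens.pop(0)
--     if tokens[-1] == "|":
--         tokens.pop(-1)
--
--     measures = []
--
--     measure = []
--     for token in tokens:
--         if is_barline(token):
--             measures.append(" ".join(measure))
--             measure = []
--         else:
--             measure.append(token)
--
--     return measures
-- ===== SOURCE B (Python) =====
-- from typing import List
--
-- _BARLINES = [
--     "|", ":|", "|:"
-- ]
--
-- def is_barline(annotation_token: str) -> bool:
--     return annotation_token in _BARLINES
--
-- def _first_barline(tokens: List[str]):
--     """Index of the first barline token, or None."""
--     for i, t in enumerate(tokens):
--         if is_barline(t):
--             return i
--     return None
--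
-- def get_measures(annotation: str) -> List[str]:
--     """Repeatedly cut off the head segment at the next barline, instead of a
--     single token-by-token pass with a scratch measure list."""
--     tokens = annotation.split()
--
--     if tokens[0] == "|":
--         tokens = tokens[1:]
--     if tokens[-1] == "|":
--         tokens = tokens[:-1]
--
--     measures = []
--     while True:
--         i = _first_barline(tokens)
--         if i is None:
--             return measures
--         measures.append(" ".join(tokens[:i]))
--         tokens = tokens[i + 1:]
-- ===== Notes on version B (the rewrite author's own statement) =====
-- stated objective: alternative
-- what changed: B repeatedly searches for the index of the next barline and cuts off the head segment in a while loop (segment-at-a-time), instead of A's single token-by-token pass accumulating the current measure in a scratch list.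
-- outside the precondition, e.g. on get_measures(''): A raises IndexError, B raises IndexError; on get_measures('|'): A raises IndexError, B raises IndexError
import Mathlib
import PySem

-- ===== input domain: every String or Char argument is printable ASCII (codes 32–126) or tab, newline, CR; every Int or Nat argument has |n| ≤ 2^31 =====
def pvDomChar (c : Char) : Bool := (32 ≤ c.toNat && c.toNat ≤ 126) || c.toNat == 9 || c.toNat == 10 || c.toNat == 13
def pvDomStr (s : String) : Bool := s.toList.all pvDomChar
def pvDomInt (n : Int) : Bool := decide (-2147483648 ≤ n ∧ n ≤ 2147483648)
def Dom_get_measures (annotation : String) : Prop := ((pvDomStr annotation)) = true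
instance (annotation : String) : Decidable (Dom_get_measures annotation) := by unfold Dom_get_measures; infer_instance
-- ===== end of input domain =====

-- B cuts the token list segment by segment at the next barline (index search + slice
-- in a while loop) instead of A's token-by-token pass with a scratch measure list
-- (objective: alternative decomposition).

-- ===== PORT A =====
def pvBarlines : List String := ["|", ":|", "|:"]

def is_barline (annotation_token : String) : Bool := pvBarlines.contains annotation_token

-- loop body of A: state = (measures, current measure's tokens)
def pvStepA (st : List String × List String) (token : String) : List String × List String :=
  if is_barline token then (st.1 ++ [PySem.Str.join " " st.2], [])
  else (st.1, st.2 ++ [token])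

def get_measures (annotation : String) : List String :=
  let tokens0 := PySem.Str.split₀ annotation
  let tokens1 := if PySem.List.pyGet? tokens0 0 = some "|" then tokens0.drop 1 else tokens0
  let tokens2 := if PySem.List.pyGet? tokens1 (-1) = some "|" then tokens1.dropLast else tokens1
  (tokens2.foldl pvStepA ([], [])).1

-- ===== PORT B =====
-- helper _first_barline: index of the first barline token, or None
def pvFirstBarline (tokens : List String) : Option Nat :=
  tokens.findIdx? is_barline

-- used by pvCut's decreasing_by: a found index is inside the list
theorem pvFirstBarline_lt : ∀ (l : List String) (i : Nat),
    pvFirstBarline l = some i → i < l.length := by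
  intro l
  induction l with
  | nil => intro i h; simp [pvFirstBarline] at h
  | cons t rest ih =>
    intro i h
    rw [pvFirstBarline, List.findIdx?_cons] at h
    by_cases hb : is_barline t
    · rw [if_pos hb] at h
      injection h with h
      simp [← h]
    · rw [if_neg hb] at h
      obtain ⟨j, hj, rfl⟩ := Option.map_eq_some_iff.mp h
      have := ih j hj
      simp only [List.length_cons]
      omega

-- B's while loop: cut off and join the head segment at the next barline, repeat
def pvCut (measures : List String) (tokens : List String) : List String :=
  match h : pvFirstBarline tokens with
  | none => measures
  | some i => pvCut (measures ++ [PySem.Str.join " " (tokens.take i)]) (tokens.drop (i + 1))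
termination_by tokens.length
decreasing_by
  have := pvFirstBarline_lt tokens i h
  simp [List.length_drop]; omega

def get_measures_alt (annotation : String) : List String :=
  let tokens0 := PySem.Str.split₀ annotation
  let tokens1 := if PySem.List.pyGet? tokens0 0 = some "|" then tokens0.drop 1 else tokens0
  let tokens2 := if PySem.List.pyGet? tokens1 (-1) = some "|" then tokens1.dropLast else tokens1
  pvCut [] tokens2

-- ===== PRECONDITION & SPEC =====
-- Pre_ excludes exactly the inputs on which Python A raises IndexError:
-- annotations whose token list is empty, or is the single token "|"
-- (popping the leading "|" empties the list, so tokens[-1] raises).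
def Pre_get_measures (annotation : String) : Prop :=
  PySem.Str.split₀ annotation ≠ [] ∧ PySem.Str.split₀ annotation ≠ ["|"]
instance (annotation : String) : Decidable (Pre_get_measures annotation) := by
  unfold Pre_get_measures; infer_instance

def pvWitness_get_measures : String := "a b | c d | e"

def Spec_get_measures (annotation : String) (out : List String) : Prop := out = get_measures_alt annotation
instance (annotation : String) (out : List String) : Decidable (Spec_get_measures annotation out) := by unfold Spec_get_measures; infer_instance

-- ===== CLAIM (what is proved, stated in full; the proofs are below) =====
def Claim_equal_get_measures : Prop := ∀ (annotation : String), Dom_get_measures annotation → Pre_get_measures annotation → Spec_get_measures annotation (get_measures annotation)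

-- ===== LEMMAS AND PROOFS =====

-- Unfolding equation of pvCut as a plain (unnamed) match
theorem pvCut_eq (ms ts : List String) :
    pvCut ms ts =
      match pvFirstBarline ts with
      | none => ms
      | some i => pvCut (ms ++ [PySem.Str.join " " (ts.take i)]) (ts.drop (i + 1)) := by
  rw [pvCut]
  cases h : pvFirstBarline ts <;> simp

-- Loop correspondence: A's fold over ts, with pending measures ms and scratch
-- measure cur, equals B's segment cutter once the first barline is located.
theorem pv_key : ∀ (ts ms cur : List String),
    (ts.foldl pvStepA (ms, cur)).1 =
      match pvFirstBarline ts with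
      | none => ms
      | some i => pvCut (ms ++ [PySem.Str.join " " (cur ++ ts.take i)]) (ts.drop (i + 1)) := by
  intro ts
  induction ts with
  | nil => intro ms cur; simp [pvFirstBarline]
  | cons t rest ih =>
    intro ms cur
    have hstep : pvFirstBarline (t :: rest)
        = if is_barline t then some 0 else (pvFirstBarline rest).map (· + 1) := by
      rw [pvFirstBarline, List.findIdx?_cons]; rfl
    rw [List.foldl_cons, hstep]
    by_cases hb : is_barline t
    · rw [pvStepA]
      simp only [hb, if_pos]
      rw [ih (ms ++ [PySem.Str.join " " cur]) []]
      rw [pvCut_eq]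
      cases hf : pvFirstBarline rest <;> simp [hf]
    · rw [pvStepA]
      simp only [hb, if_neg, Bool.false_eq_true, not_false_iff]
      rw [ih ms (cur ++ [t])]
      cases hf : pvFirstBarline rest with
      | none => rfl
      | some i => simp [List.take_succ_cons, List.drop_succ_cons]

-- ===== VERDICT (by name: the statement is the Claim_ definition above) =====
theorem get_measures_spec : Claim_equal_get_measures := by
  intro annotation _ _
  unfold Spec_get_measures get_measures get_measures_alt
  simp only []
  rw [pv_key, pvCut_eq]
  cases h : pvFirstBarline
      (let tokens0 := PySem.Str.split₀ annotation
       let tokens1 := if PySem.List.pyGet? tokens0 0 = some "|" then tokens0.drop 1 else tokens0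
       if PySem.List.pyGet? tokens1 (-1) = some "|" then tokens1.dropLast else tokens1) <;>
    simp
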